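-- pv_equiv track=rewrite | github.com/YunChenChuang/MystanCodeProjects | stanCodeProjects/<Recursion Search Algorithm>_Largest_digit.py | find_largest_digit_helper
-- ===== SOURCE A (Python) =====
-- def find_largest_digit_helper(s):
--
--     if len(s) <= 1:  # Base Case
--         return s
--
--     else:
--         s1 = s[0]
--         s2 = s[1]
--
--         if not s1.isdigit():
--             s = s[1:len(s)]
--         else:
--             if s1 >= s2:  # if s1 > s2
--                 s = s1 + s[2:len(s)]  # s1 will replace s2
--             else:  # if s2 > s1
--                 s = s[1:len(s)]  # s1 will be dropped
--
--         return find_largest_digit_helper(s)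
-- ===== SOURCE B (Python) =====
-- def find_largest_digit_helper(s):
--     # Single left-to-right pass keeping a current char, instead of A's
--     # recursive re-slicing of the string (same comparison rules).
--     if not s:
--         return s
--     cur = s[0]
--     for c in s[1:]:
--         if not (cur.isdigit() and cur >= c):
--             cur = c
--     return cur
-- ===== Notes on version B (the rewrite author's own statement) =====
-- stated objective: faster
-- what changed: Replaces A's recursion that rebuilds a sliced copy of the string at every step with a single left-to-right fold maintaining the current char under the same comparison rules.
import Mathlib
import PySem

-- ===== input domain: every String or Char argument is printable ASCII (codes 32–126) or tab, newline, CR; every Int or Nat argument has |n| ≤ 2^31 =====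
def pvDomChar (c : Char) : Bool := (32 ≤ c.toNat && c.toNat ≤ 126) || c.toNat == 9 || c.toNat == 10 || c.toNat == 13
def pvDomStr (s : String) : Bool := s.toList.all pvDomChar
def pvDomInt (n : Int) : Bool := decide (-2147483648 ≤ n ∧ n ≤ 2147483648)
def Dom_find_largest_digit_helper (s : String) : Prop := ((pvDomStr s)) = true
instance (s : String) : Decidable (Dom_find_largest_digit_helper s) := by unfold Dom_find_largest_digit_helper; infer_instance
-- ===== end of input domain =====

-- B replaces A's recursive string re-slicing with a single left-to-right fold
-- keeping the current char (same comparison rules); asymptotically faster.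


-- ===== PORT A =====
-- A's recursion, on the string's char list: base case len ≤ 1 returns s;
-- else compare the first two chars and recurse on the shortened list
-- (s[1:] / s1 + s[2:] are the tail / cons-tail of the list, exact here).
def pvGoA : List Char → List Char
  | [] => []
  | [c] => [c]
  | s1 :: s2 :: rest =>
    if ¬ PySem.Chars.isdigit s1 then pvGoA (s2 :: rest)
    else
      if s2 ≤ s1 then pvGoA (s1 :: rest)
      else pvGoA (s2 :: rest)
termination_by l => l.length

def find_largest_digit_helper (s : String) : String :=
  String.ofList (pvGoA s.toList)

-- ===== PORT B =====
-- B: one fold over the tail, maintaining the current char.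
def pvStepB (cur c : Char) : Char :=
  if ¬ (PySem.Chars.isdigit cur ∧ c ≤ cur) then c else cur

def find_largest_digit_helper_alt (s : String) : String :=
  match s.toList with
  | [] => s
  | c :: rest => String.ofList [rest.foldl pvStepB c]

-- ===== PRECONDITION & SPEC =====
def Spec_find_largest_digit_helper (s : String) (out : String) : Prop := out = find_largest_digit_helper_alt s
instance (s : String) (out : String) : Decidable (Spec_find_largest_digit_helper s out) := by unfold Spec_find_largest_digit_helper; infer_instance

-- ===== CLAIM (what is proved, stated in full; the proofs are below) =====
def Claim_equal_find_largest_digit_helper : Prop := ∀ (s : String), Dom_find_largest_digit_helper s → Spec_find_largest_digit_helper s (find_largest_digit_helper s)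

-- ===== LEMMAS AND PROOFS =====

-- A's recursion starting from cur :: rest computes exactly B's fold.
theorem pvGoA_eq_foldl (rest : List Char) : ∀ cur, pvGoA (cur :: rest) = [rest.foldl pvStepB cur] := by
  induction rest with
  | nil => intro cur; simp [pvGoA]
  | cons c rs ih =>
    intro cur
    simp only [pvGoA, List.foldl, pvStepB]
    by_cases hd : PySem.Chars.isdigit cur
    · by_cases hle : c ≤ cur
      · simp [hd, hle, ih]
      · simp [hd, hle, ih]
    · simp [hd, ih]

-- ===== VERDICT (by name: the statement is the Claim_ definition above) =====
theorem find_largest_digit_helper_spec : Claim_equal_find_largest_digit_helper := by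
  intro s _
  show find_largest_digit_helper s = find_largest_digit_helper_alt s
  unfold find_largest_digit_helper find_largest_digit_helper_alt
  cases hs : s.toList with
  | nil =>
    have h2 : s = String.ofList s.toList := by simp
    rw [hs] at h2
    simp [pvGoA, h2]
  | cons c rest => simp [pvGoA_eq_foldl]
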